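-- pv_equiv track=rewrite | github.com/yangyu0330/prompt_injection_fuzzing_third | prompt_injection_fuzzing/test1/prompt_injection_fuzzer.py | insert_zero_width
-- ===== SOURCE A (Python) =====
-- def insert_zero_width(text: str) -> str:
--     zw = "\u200b"
--     out = []
--     for i, ch in enumerate(text):
--         out.append(ch)
--         if i % 2 == 1 and ch.strip():
--             out.append(zw)
--     return "".join(out)
-- ===== SOURCE B (Python) =====
-- def insert_zero_width(text: str) -> str:
--     zw = "\u200b"
--     evens = text[0::2]
--     odds = text[1::2]
--     parts = []
--     for e, o in zip(evens, odds):
--         parts.append(e)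
--         parts.append(o)
--         if o.strip():
--             parts.append(zw)
--     if len(text) % 2 == 1:
--         parts.append(text[-1])
--     return "".join(parts)
-- ===== Notes on version B (the rewrite author's own statement) =====
-- stated objective: alternative
-- what changed: Replaces the flat enumerate + index-parity loop with a pair-shaped pass: slice the text into even- and odd-index subsequences, iterate over their zip emitting (even, odd, optional zero-width space), and append the unpaired final character for odd lengths.
import Mathlib
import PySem

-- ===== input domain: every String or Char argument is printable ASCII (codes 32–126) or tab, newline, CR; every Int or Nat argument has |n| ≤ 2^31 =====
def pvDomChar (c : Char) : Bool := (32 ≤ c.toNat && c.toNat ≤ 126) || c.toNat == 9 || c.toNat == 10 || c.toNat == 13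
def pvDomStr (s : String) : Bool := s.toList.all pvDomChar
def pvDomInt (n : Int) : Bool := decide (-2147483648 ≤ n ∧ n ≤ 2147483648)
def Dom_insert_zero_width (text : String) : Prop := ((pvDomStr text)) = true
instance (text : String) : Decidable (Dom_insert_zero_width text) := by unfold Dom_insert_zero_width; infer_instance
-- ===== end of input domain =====

-- B replaces A's flat enumerate+parity loop by even/odd slices zipped into a pair-shaped pass (alternative decomposition, same cost).


-- ===== PORT A =====
-- for i, ch in enumerate(text): out.append(ch); if i % 2 == 1 and ch.strip(): out.append(zw)
def insert_zero_width (text : String) : String :=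
  let zw : Char := '\u200B'
  let out := (PySem.List.enumerate text.toList 0).foldl
    (fun (out : List Char) (p : Int × Char) =>
      let out := out ++ [p.2]
      if PySem.Int.mod p.1 2 == 1 && !(PySem.Chars.strip [p.2]).isEmpty then out ++ [zw] else out)
    []
  String.ofList out

-- ===== PORT B =====
-- evens = text[0::2]; odds = text[1::2]; loop over zip(evens, odds); append text[-1] if len odd
def insert_zero_width_alt (text : String) : String :=
  let zw : Char := '\u200B'
  let tl := text.toList
  let evens := (PySem.List.slice? tl (some 0) none 2).getD []   -- step ≠ 0, never none
  let odds  := (PySem.List.slice? tl (some 1) none 2).getD []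
  let parts := (evens.zip odds).foldl
    (fun (parts : List Char) (p : Char × Char) =>
      parts ++ [p.1, p.2] ++ (if !(PySem.Chars.strip [p.2]).isEmpty then [zw] else []))
    []
  let parts := if tl.length % 2 == 1 then
      parts ++ (match PySem.List.pyGet? tl (-1) with | some c => [c] | none => [])  -- guarded: list nonempty
    else parts
  String.ofList parts

-- ===== PRECONDITION & SPEC =====
def Spec_insert_zero_width (text : String) (out : String) : Prop := out = insert_zero_width_alt text
instance (text : String) (out : String) : Decidable (Spec_insert_zero_width text out) := by unfold Spec_insert_zero_width; infer_instance

-- ===== CLAIM (what is proved, stated in full; the proofs are below) =====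
def Claim_equal_insert_zero_width : Prop := ∀ (text : String), Dom_insert_zero_width text → Spec_insert_zero_width text (insert_zero_width text)

-- ===== LEMMAS AND PROOFS =====

-- every-other-element helper (proof-only)
def pvEvens {α : Type} : List α → List α
  | [] => []
  | a :: t => a :: pvEvens t.tail
termination_by l => l.length
decreasing_by simp [List.length_tail]

-- two-at-a-time induction on lists
theorem pvTwoInduct {α : Type} (P : List α → Prop) (h0 : P []) (h1 : ∀ a, P [a])
    (h2 : ∀ a b t, P t → P (a :: b :: t)) : ∀ l, P l
  | [] => h0
  | [a] => h1 a
  | a :: b :: t => h2 a b t (pvTwoInduct P h0 h1 h2 t)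
termination_by l => l.length

theorem pvMod_two_even (k : Nat) : PySem.Int.mod (2 * (k : Int)) 2 = 0 := by
  simp [PySem.Int.mod]

theorem pvMod_two_odd (k : Nat) : PySem.Int.mod (2 * (k : Int) + 1) 2 = 1 := by
  simp [PySem.Int.mod]

theorem pvFmEvens {α : Type} (xs : List α) :
    (List.range ((xs.length + 1) / 2)).filterMap (fun k => xs[2 * k]?) = pvEvens xs := by
  induction xs using pvTwoInduct with
  | h0 => simp [pvEvens]
  | h1 a => simp [pvEvens]
  | h2 a b t ih =>
    have hl : ((a :: b :: t).length + 1) / 2 = (t.length + 1) / 2 + 1 := by simp; omega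
    rw [hl, List.range_succ_eq_map, List.filterMap_cons, List.filterMap_map]
    simp only [List.getElem?_cons_zero, Nat.mul_zero]
    show a :: _ = _
    rw [pvEvens]
    congr 1

theorem pvFmOdds {α : Type} (xs : List α) :
    (List.range (xs.length / 2)).filterMap (fun k => xs[2 * k + 1]?) = pvEvens xs.tail := by
  induction xs using pvTwoInduct with
  | h0 => simp [pvEvens]
  | h1 a => simp [pvEvens]
  | h2 a b t ih =>
    have hl : (a :: b :: t).length / 2 = t.length / 2 + 1 := by simp; omega
    rw [hl, List.range_succ_eq_map, List.filterMap_cons, List.filterMap_map]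
    simp only [Nat.mul_zero, Nat.zero_add, List.getElem?_cons_succ, List.getElem?_cons_zero]
    show b :: _ = _
    show b :: _ = pvEvens (b :: t)
    rw [pvEvens]
    congr 1

theorem pvSliceEvens {α : Type} (xs : List α) :
    PySem.List.slice? xs (some 0) none 2 = some (pvEvens xs) := by
  rw [← pvFmEvens]
  simp only [PySem.List.slice?, PySem.List.sliceIndices]
  norm_num
  have hc : (if 0 < xs.length then (((xs.length : Int) + 2 - 1) / 2).toNat else 0)
      = (xs.length + 1) / 2 := by split <;> omega
  rw [hc]
  apply List.filterMap_congr
  intro x _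
  congr 1

theorem pvSliceOdds {α : Type} (xs : List α) :
    PySem.List.slice? xs (some 1) none 2 = some (pvEvens xs.tail) := by
  rw [← pvFmOdds]
  simp only [PySem.List.slice?, PySem.List.sliceIndices]
  norm_num
  rcases Nat.eq_zero_or_pos xs.length with h | h
  · simp [h]
  · have hm : min 1 (xs.length : Int) = 1 := by omega
    rw [hm]
    have hc : (if 1 < xs.length then (((xs.length : Int) - 1 + 2 - 1) / 2).toNat else 0)
        = xs.length / 2 := by split <;> omega
    rw [hc]
    apply List.filterMap_congr
    intro x _
    congr 1
    omega

theorem pvMain (l : List Char) : ∀ (k : Nat),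
    (PySem.List.enumerate l (2 * (k : Int))).flatMap
      (fun p => [p.2] ++ (if PySem.Int.mod p.1 2 == 1 && !(PySem.Chars.strip [p.2]).isEmpty then ['\u200B'] else []))
    = ((pvEvens l).zip (pvEvens l.tail)).flatMap
        (fun p => [p.1, p.2] ++ (if !(PySem.Chars.strip [p.2]).isEmpty then ['\u200B'] else []))
      ++ (if l.length % 2 == 1 then
            (match PySem.List.pyGet? l (-1) with | some c => [c] | none => []) else []) := by
  induction l using pvTwoInduct with
  | h0 => intro k; simp [PySem.List.enumerate, pvEvens]
  | h1 a =>
    intro k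
    simp [PySem.List.enumerate_cons, PySem.List.enumerate_nil, pvEvens,
      PySem.List.pyGet?_neg_one]
  | h2 a b t ih =>
    intro k
    rw [PySem.List.enumerate_cons, PySem.List.enumerate_cons]
    have hcast : 2 * (k : Int) + 1 + 1 = 2 * ((k + 1 : Nat) : Int) := by push_cast; ring
    rw [hcast]
    simp only [List.flatMap_cons, ih (k + 1), pvMod_two_even, pvMod_two_odd]
    have hev : pvEvens (a :: b :: t) = a :: pvEvens t := by rw [pvEvens]; rfl
    have hod : pvEvens (a :: b :: t).tail = b :: pvEvens t.tail := by
      show pvEvens (b :: t) = _; rw [pvEvens]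
    rw [hev, hod]
    simp only [List.zip_cons_cons, List.flatMap_cons]
    have htail : (if (a :: b :: t).length % 2 == 1 then
            (match PySem.List.pyGet? (a :: b :: t) (-1) with | some c => [c] | none => []) else [])
        = (if t.length % 2 == 1 then
            (match PySem.List.pyGet? t (-1) with | some c => [c] | none => []) else []) := by
      rcases t with _ | ⟨c, t'⟩
      · simp
      · simp only [List.length_cons]
        by_cases h : (t'.length + 1) % 2 = 1
        · have h1 : ((t'.length + 1 + 1 + 1) % 2 == 1) = true := by simp; omega
          have h2 : ((t'.length + 1) % 2 == 1) = true := by simp; omega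
          simp only [h1, h2, if_true]
          rw [PySem.List.pyGet?_neg_one, PySem.List.pyGet?_neg_one,
            List.getLast?_cons_cons, List.getLast?_cons_cons]
        · have h1 : ((t'.length + 1 + 1 + 1) % 2 == 1) = false := by simp; omega
          have h2 : ((t'.length + 1) % 2 == 1) = false := by simp; omega
          simp [h1, h2]
    rw [htail]
    simp [List.append_assoc]

-- ===== VERDICT (by name: the statement is the Claim_ definition above) =====
theorem insert_zero_width_spec : Claim_equal_insert_zero_width := by
  intro text _
  unfold Spec_insert_zero_width insert_zero_width insert_zero_width_alt
  simp only [pvSliceEvens, pvSliceOdds, Option.getD_some]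
  have hA : (fun (out : List Char) (p : Int × Char) =>
        let out := out ++ [p.2]
        if PySem.Int.mod p.1 2 == 1 && !(PySem.Chars.strip [p.2]).isEmpty then out ++ ['\u200B'] else out)
      = (fun (out : List Char) (p : Int × Char) =>
        out ++ ([p.2] ++ (if PySem.Int.mod p.1 2 == 1 && !(PySem.Chars.strip [p.2]).isEmpty then ['\u200B'] else []))) := by
    funext out p
    dsimp only
    split <;> simp
  have hB : (fun (parts : List Char) (p : Char × Char) =>
        parts ++ [p.1, p.2] ++ (if !(PySem.Chars.strip [p.2]).isEmpty then ['\u200B'] else []))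
      = (fun (parts : List Char) (p : Char × Char) =>
        parts ++ ([p.1, p.2] ++ (if !(PySem.Chars.strip [p.2]).isEmpty then ['\u200B'] else []))) := by
    funext parts p
    simp
  rw [hA, hB, PySem.List.foldl_append_eq_flatMap, PySem.List.foldl_append_eq_flatMap]
  have h0 : (0 : Int) = 2 * ((0 : Nat) : Int) := by simp
  rw [h0, pvMain]
  split
  · simp
  · simp
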